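-- pv_equiv track=rewrite | github.com/gabriellaec/desoft-analise-exercicios | backup/user_170/ch167_2020_06_21_20_32_10_019034.py | total_do_semestre_por_bairro
-- ===== SOURCE A (Python) =====
-- def total_do_semestre_por_bairro(dic):
--     novoDic = {}
--     for i in dic:
--         gastoTotal = 0
--         for v in range(6,len(dic[i])):
--             gastoTotal += dic[i][v]
--         novoDic[i] = gastoTotal
--     return max(novoDic, key= novoDic.get)
-- ===== SOURCE B (Python) =====
-- def total_do_semestre_por_bairro(dic):
--     best = None
--     for k in dic:
--         total = sum(dic[k][6:])
--         if best is None or total > best[1]: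
--             best = (k, total)
--     if best is None:
--         raise ValueError("max() arg is an empty sequence")
--     return best[0]
-- ===== Notes on version B (the rewrite author's own statement) =====
-- stated objective: simpler
-- what changed: B drops the intermediate novoDic dict entirely: a single pass over the keys keeps a running (best_key, best_total) pair, computing each tail-sum with sum(dic[k][6:]) and updating only on a strictly greater total (preserving max's first-maximum tie-break); A builds a whole second dict and then calls max over it.
import Mathlib
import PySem

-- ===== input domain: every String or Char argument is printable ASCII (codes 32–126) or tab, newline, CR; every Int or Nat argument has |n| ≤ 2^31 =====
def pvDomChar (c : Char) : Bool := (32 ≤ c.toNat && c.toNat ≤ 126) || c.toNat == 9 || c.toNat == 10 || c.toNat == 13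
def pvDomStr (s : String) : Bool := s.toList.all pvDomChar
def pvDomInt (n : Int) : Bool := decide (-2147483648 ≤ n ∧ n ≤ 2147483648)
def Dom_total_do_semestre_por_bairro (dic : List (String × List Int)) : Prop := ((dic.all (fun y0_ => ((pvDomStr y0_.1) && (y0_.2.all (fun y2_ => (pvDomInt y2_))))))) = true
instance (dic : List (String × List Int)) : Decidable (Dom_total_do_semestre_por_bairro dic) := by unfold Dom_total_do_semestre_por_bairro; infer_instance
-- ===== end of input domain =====

-- B replaces A's intermediate dict (build novoDic, then max over it) by a single pass keeping a
-- running (best_key, best_total) pair — same value, simpler decomposition, no second dict.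


-- ===== PORT A =====
def total_do_semestre_por_bairro (dic : List (String × List Int)) : String :=
  let d := PySem.Dict.ofList dic
  let novoDic : PySem.Dict String Int :=
    d.keys.foldl (fun novoDic i =>
      -- gastoTotal = 0; for v in range(6, len(dic[i])): gastoTotal += dic[i][v]
      -- (i is a key of d, so d.getD i [] is exactly dic[i])
      let gastoTotal : Int :=
        (PySem.List.pyRange 6 (PySem.List.len (d.getD i []))).foldl
          (fun gastoTotal v => gastoTotal + PySem.List.pyGetD (d.getD i []) v 0) 0
      novoDic.insert i gastoTotal) PySem.Dict.empty
  -- max(novoDic, key=novoDic.get); every key is present, so .get is its stored value.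
  -- On an empty dict Python's max raises ValueError: "" here, excluded by Pre_.
  match PySem.List.max? novoDic.keys (fun k => novoDic.getD k 0) with
  | some k => k
  | none => ""

-- ===== PORT B =====
def total_do_semestre_por_bairro_alt (dic : List (String × List Int)) : String :=
  let d := PySem.Dict.ofList dic
  let best :=
    d.keys.foldl (fun best k =>
      let total : Int := (PySem.List.slice (d.getD k []) (some 6) none).sum
      match best with
      | none => some (k, total)
      | some (bk, bt) => if bt < total then some (k, total) else some (bk, bt)) none
  -- on an empty dict Python B raises ValueError: "" here, excluded by Pre_
  match best with
  | some (bk, _) => bk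
  | none => ""

-- ===== PRECONDITION & SPEC =====
-- Pre_ excludes only the empty dict, on which A's max() (and B too) raises ValueError.
def Pre_total_do_semestre_por_bairro (dic : List (String × List Int)) : Prop := dic ≠ []
instance (dic : List (String × List Int)) : Decidable (Pre_total_do_semestre_por_bairro dic) := by unfold Pre_total_do_semestre_por_bairro; infer_instance
def pvWitness_total_do_semestre_por_bairro : (List (String × List Int)) := [("a", [1, 2, 3, 4, 5, 6, 7, 8]), ("b", [0, 0, 0, 0, 0, 0, 9])]
def Spec_total_do_semestre_por_bairro (dic : List (String × List Int)) (out : String) : Prop := out = total_do_semestre_por_bairro_alt dic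
instance (dic : List (String × List Int)) (out : String) : Decidable (Spec_total_do_semestre_por_bairro dic out) := by unfold Spec_total_do_semestre_por_bairro; infer_instance

-- ===== CLAIM (what is proved, stated in full; the proofs are below) =====
def Claim_equal_total_do_semestre_por_bairro : Prop := ∀ (dic : List (String × List Int)), Dom_total_do_semestre_por_bairro dic → Pre_total_do_semestre_por_bairro dic → Spec_total_do_semestre_por_bairro dic (total_do_semestre_por_bairro dic)

-- ===== LEMMAS AND PROOFS =====

-- getD after an insert-loop whose value depends only on the key
lemma pv_getD_foldl_insert (g : String → Int) :
    ∀ (l : List String) (d : PySem.Dict String Int) (k : String),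
      (l.foldl (fun nd i => nd.insert i (g i)) d).getD k 0 =
        if k ∈ l then g k else d.getD k 0 := by
  intro l
  induction l with
  | nil => intro d k; simp
  | cons x l ih =>
    intro d k
    simp only [List.foldl_cons, ih, PySem.Dict.getD_insert]
    by_cases hl : k ∈ l <;> by_cases hx : k = x <;> simp [hl, hx]

-- the keys of that insert-loop (over the Nodup key list itself) are the key list
lemma pv_keys_foldl_insert (g : String → Int) (l : List String) (hnd : l.Nodup) :
    (l.foldl (fun nd i => nd.insert i (g i)) PySem.Dict.empty).keys = l := by
  rw [PySem.Dict.keys_foldl_insert]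
  rw [PySem.Dict.keys_empty, PySem.Set.update_nil_left]
  exact PySem.Set.ofList_eq_self_of_nodup l hnd

-- max? written as the running-best fold over an explicit lambda
lemma pv_max?_eq_fold (l : List String) (f : String → Int) :
    PySem.List.max? l f = l.foldl (fun acc x => match acc with
      | none => some x
      | some m => if f m < f x then some x else some m) none := by
  unfold PySem.List.max?
  congr 1
  funext acc x
  cases acc <;> rfl

-- max?'s fold only looks at key values of elements it has seen
lemma pv_max_fold_congr (f g : String → Int) :
    ∀ (l : List String) (a : Option String),
      (∀ x ∈ l, f x = g x) → (∀ m, a = some m → f m = g m) →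
      l.foldl (fun acc x => match acc with
        | none => some x
        | some m => if f m < f x then some x else some m) a =
      l.foldl (fun acc x => match acc with
        | none => some x
        | some m => if g m < g x then some x else some m) a := by
  intro l
  induction l with
  | nil => intro a _ _; rfl
  | cons x l ih =>
    intro a h1 h2
    have hx : f x = g x := h1 x List.mem_cons_self
    have h1' : ∀ y ∈ l, f y = g y := fun y hy => h1 y (List.mem_cons_of_mem _ hy)
    cases a with
    | none =>
      simp only [List.foldl_cons]
      exact ih (some x) h1' (by rintro m hm; cases hm; exact hx)
    | some m =>
      have hm : f m = g m := h2 m rfl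
      simp only [List.foldl_cons, hm, hx]
      split
      · exact ih (some x) h1' (by rintro m' hm'; cases hm'; exact hx)
      · exact ih (some m) h1' (by rintro m' hm'; cases hm'; exact hm)

lemma pv_max?_congr (l : List String) (f g : String → Int)
    (h : ∀ x ∈ l, f x = g x) :
    PySem.List.max? l f = PySem.List.max? l g := by
  rw [pv_max?_eq_fold, pv_max?_eq_fold]
  exact pv_max_fold_congr f g l none h (by rintro m ⟨⟩)

-- B's running (best_key, best_total) pair is max?'s fold with the key value carried along
lemma pv_pair_fold (g : String → Int) :
    ∀ (l : List String) (a : Option String),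
      l.foldl (fun best k => match best with
        | none => some (k, g k)
        | some (bk, bt) => if bt < g k then some (k, g k) else some (bk, bt))
        (a.map (fun k => (k, g k))) =
      (l.foldl (fun acc x => match acc with
        | none => some x
        | some m => if g m < g x then some x else some m) a).map (fun k => (k, g k)) := by
  intro l
  induction l with
  | nil => intro a; rfl
  | cons x l ih =>
    intro a
    cases a with
    | none => simpa using ih (some x)
    | some m =>
      simp only [List.foldl_cons, Option.map_some]
      by_cases h : g m < g x
      · simpa [h] using ih (some x)
      · simpa [h] using ih (some m)

lemma pv_pair_fold_none (g : String → Int) (l : List String) :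
    l.foldl (fun best k => match best with
      | none => some (k, g k)
      | some (bk, bt) => if bt < g k then some (k, g k) else some (bk, bt)) none =
    (PySem.List.max? l g).map (fun k => (k, g k)) := by
  have := pv_pair_fold g l none
  simpa [pv_max?_eq_fold] using this

-- both ports, reduced to the same max? over the same key function, agree
lemma pv_core (d : PySem.Dict String (List Int)) (g : String → Int) (hnd : d.keys.Nodup) :
    (match PySem.List.max?
        (d.keys.foldl (fun nd i => nd.insert i (g i)) PySem.Dict.empty).keys
        (fun k => (d.keys.foldl (fun nd i => nd.insert i (g i)) PySem.Dict.empty).getD k 0) with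
     | some k => k
     | none => "") =
    (match d.keys.foldl (fun best k => match best with
        | none => some (k, g k)
        | some (bk, bt) => if bt < g k then some (k, g k) else some (bk, bt)) none with
     | some (bk, _) => bk
     | none => "") := by
  rw [pv_keys_foldl_insert g d.keys hnd]
  rw [pv_max?_congr d.keys _ g
    (fun k hk => by rw [pv_getD_foldl_insert]; simp [hk])]
  rw [pv_pair_fold_none g d.keys]
  cases PySem.List.max? d.keys g <;> simp

lemma pv_ports_eq (dic : List (String × List Int)) :
    total_do_semestre_por_bairro dic = total_do_semestre_por_bairro_alt dic := by
  unfold total_do_semestre_por_bairro total_do_semestre_por_bairro_alt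
  have hA1 : ∀ xs : List Int,
      (PySem.List.pyRange 6 (PySem.List.len xs)).foldl
        (fun gastoTotal v => gastoTotal + PySem.List.pyGetD xs v 0) 0 =
      (xs.drop 6).foldl (· + ·) 0 := by
    intro xs
    have := PySem.List.foldl_pyRange_pyGetD xs 0 (· + ·) 0 (by norm_num : (0:Int) ≤ 6)
    simpa using this
  have hB1 : ∀ xs : List Int,
      (PySem.List.slice xs (some 6) none).sum = (xs.drop 6).foldl (· + ·) 0 := by
    intro xs
    rw [PySem.List.slice_from (xs := xs) (a := (6:Int)) (by norm_num)]
    simp [List.sum_eq_foldl]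
  simp only [hA1, hB1]
  exact pv_core (PySem.Dict.ofList dic)
    (fun k => (((PySem.Dict.ofList dic).getD k []).drop 6).foldl (· + ·) 0)
    (PySem.Dict.nodup_keys_ofList dic)

-- ===== VERDICT (by name: the statement is the Claim_ definition above) =====
theorem total_do_semestre_por_bairro_spec : Claim_equal_total_do_semestre_por_bairro := by
  intro dic _ _
  unfold Spec_total_do_semestre_por_bairro
  exact pv_ports_eq dic
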